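-- pv_equiv track=rewrite | github.com/henryoman/kronos | sol_5m_btc_alignment_search.py | incompatible_pair
-- ===== SOURCE A (Python) =====
-- def incompatible_pair(left: str, right: str) -> bool:
--     groups = [
--         {"sol_high_atr", "sol_low_atr"},
--         {"sol_high_vol24", "sol_low_vol24"},
--         {"sol_high_vol72", "sol_low_vol72"},
--         {"sol_high_volume", "sol_low_volume"},
--         {"sol_rsi_hot", "sol_rsi_cold", "sol_rsi_mid"},
--         {"sol_mom24_up", "sol_mom24_down"},
--         {"sol_mom72_up", "sol_mom72_down"},
--         {"sol_trend72_up", "sol_trend72_down"},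
--         {"sol_trend288_up", "sol_trend288_down"},
--         {"btc_high_atr", "btc_low_atr"},
--         {"btc_high_vol24", "btc_low_vol24"},
--         {"btc_high_vol72", "btc_low_vol72"},
--         {"btc_high_volume", "btc_low_volume"},
--         {"btc_rsi_hot", "btc_rsi_cold", "btc_rsi_mid"},
--         {"btc_mom24_up", "btc_mom24_down"},
--         {"btc_mom72_up", "btc_mom72_down"},
--         {"btc_trend72_up", "btc_trend72_down"},
--         {"btc_trend288_up", "btc_trend288_down"},
--         {"btc_p_ge_0p6", "btc_p_le_0p4"},
--         {"btc_p_ge_0p8", "btc_p_le_0p2"},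
--         {"btc_forecast_up", "btc_forecast_down"},
--         {"btc_sol_agree", "btc_sol_disagree"},
--         {"hour_0_7", "hour_8_15", "hour_16_23"},
--         {"weekday", "weekend"},
--     ]
--     return any(left in group and right in group for group in groups)
-- ===== SOURCE B (Python) =====
-- # Precomputed flat lookup table: each label is mapped directly to its group id,
-- # so the per-call scan over group sets disappears entirely.
-- _GROUP_OF = {
--     "sol_high_atr": 0, "sol_low_atr": 0,
--     "sol_high_vol24": 1, "sol_low_vol24": 1,
--     "sol_high_vol72": 2, "sol_low_vol72": 2,
--     "sol_high_volume": 3, "sol_low_volume": 3,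
--     "sol_rsi_hot": 4, "sol_rsi_cold": 4, "sol_rsi_mid": 4,
--     "sol_mom24_up": 5, "sol_mom24_down": 5,
--     "sol_mom72_up": 6, "sol_mom72_down": 6,
--     "sol_trend72_up": 7, "sol_trend72_down": 7,
--     "sol_trend288_up": 8, "sol_trend288_down": 8,
--     "btc_high_atr": 9, "btc_low_atr": 9,
--     "btc_high_vol24": 10, "btc_low_vol24": 10,
--     "btc_high_vol72": 11, "btc_low_vol72": 11,
--     "btc_high_volume": 12, "btc_low_volume": 12,
--     "btc_rsi_hot": 13, "btc_rsi_cold": 13, "btc_rsi_mid": 13,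
--     "btc_mom24_up": 14, "btc_mom24_down": 14,
--     "btc_mom72_up": 15, "btc_mom72_down": 15,
--     "btc_trend72_up": 16, "btc_trend72_down": 16,
--     "btc_trend288_up": 17, "btc_trend288_down": 17,
--     "btc_p_ge_0p6": 18, "btc_p_le_0p4": 18,
--     "btc_p_ge_0p8": 19, "btc_p_le_0p2": 19,
--     "btc_forecast_up": 20, "btc_forecast_down": 20,
--     "btc_sol_agree": 21, "btc_sol_disagree": 21,
--     "hour_0_7": 22, "hour_8_15": 22, "hour_16_23": 22,
--     "weekday": 23, "weekend": 23,
-- }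
--
-- def incompatible_pair(left: str, right: str) -> bool:
--     g = _GROUP_OF.get(left)
--     return g is not None and g == _GROUP_OF.get(right)
-- ===== Notes on version B (the rewrite author's own statement) =====
-- stated objective: alternative
-- what changed: Replaced the per-call scan over 24 group sets (testing both labels against each set) with a single precomputed flat label->group-id table consulted by two lookups, with no per-call iteration over groups at all.
import Mathlib
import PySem

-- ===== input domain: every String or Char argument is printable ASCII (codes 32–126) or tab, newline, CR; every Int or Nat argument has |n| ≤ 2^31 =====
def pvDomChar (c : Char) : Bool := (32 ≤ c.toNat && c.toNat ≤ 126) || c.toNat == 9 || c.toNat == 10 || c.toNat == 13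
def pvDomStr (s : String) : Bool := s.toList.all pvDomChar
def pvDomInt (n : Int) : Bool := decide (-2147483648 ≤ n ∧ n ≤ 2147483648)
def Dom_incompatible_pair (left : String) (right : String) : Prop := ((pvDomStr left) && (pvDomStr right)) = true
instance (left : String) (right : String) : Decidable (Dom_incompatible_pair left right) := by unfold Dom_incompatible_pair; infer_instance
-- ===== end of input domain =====

-- B replaces A's per-call scan over 24 group sets with a precomputed flat
-- label -> group-id table and two lookups (objective: alternative).

-- ===== PORT A =====
def pvGroups_A : List (PySem.Set String) :=
  [PySem.Set.ofList ["sol_high_atr", "sol_low_atr"],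
   PySem.Set.ofList ["sol_high_vol24", "sol_low_vol24"],
   PySem.Set.ofList ["sol_high_vol72", "sol_low_vol72"],
   PySem.Set.ofList ["sol_high_volume", "sol_low_volume"],
   PySem.Set.ofList ["sol_rsi_hot", "sol_rsi_cold", "sol_rsi_mid"],
   PySem.Set.ofList ["sol_mom24_up", "sol_mom24_down"],
   PySem.Set.ofList ["sol_mom72_up", "sol_mom72_down"],
   PySem.Set.ofList ["sol_trend72_up", "sol_trend72_down"],
   PySem.Set.ofList ["sol_trend288_up", "sol_trend288_down"],
   PySem.Set.ofList ["btc_high_atr", "btc_low_atr"],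
   PySem.Set.ofList ["btc_high_vol24", "btc_low_vol24"],
   PySem.Set.ofList ["btc_high_vol72", "btc_low_vol72"],
   PySem.Set.ofList ["btc_high_volume", "btc_low_volume"],
   PySem.Set.ofList ["btc_rsi_hot", "btc_rsi_cold", "btc_rsi_mid"],
   PySem.Set.ofList ["btc_mom24_up", "btc_mom24_down"],
   PySem.Set.ofList ["btc_mom72_up", "btc_mom72_down"],
   PySem.Set.ofList ["btc_trend72_up", "btc_trend72_down"],
   PySem.Set.ofList ["btc_trend288_up", "btc_trend288_down"],
   PySem.Set.ofList ["btc_p_ge_0p6", "btc_p_le_0p4"],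
   PySem.Set.ofList ["btc_p_ge_0p8", "btc_p_le_0p2"],
   PySem.Set.ofList ["btc_forecast_up", "btc_forecast_down"],
   PySem.Set.ofList ["btc_sol_agree", "btc_sol_disagree"],
   PySem.Set.ofList ["hour_0_7", "hour_8_15", "hour_16_23"],
   PySem.Set.ofList ["weekday", "weekend"]]

def incompatible_pair (left : String) (right : String) : Bool :=
  pvGroups_A.any (fun g => PySem.Set.contains g left && PySem.Set.contains g right)

-- ===== PORT B =====
-- the precomputed flat table _GROUP_OF of Source B (a dict literal, no construction loop)
def pvGroupOf : PySem.Dict String Int := PySem.Dict.mk [("sol_high_atr", 0), ("sol_low_atr", 0), ("sol_high_vol24", 1), ("sol_low_vol24", 1), ("sol_high_vol72", 2), ("sol_low_vol72", 2), ("sol_high_volume", 3), ("sol_low_volume", 3), ("sol_rsi_hot", 4), ("sol_rsi_cold", 4), ("sol_rsi_mid", 4), ("sol_mom24_up", 5), ("sol_mom24_down", 5), ("sol_mom72_up", 6), ("sol_mom72_down", 6), ("sol_trend72_up", 7), ("sol_trend72_down", 7), ("sol_trend288_up", 8), ("sol_trend288_down", 8), ("btc_high_atr", 9), ("btc_low_atr",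 9), ("btc_high_vol24", 10), ("btc_low_vol24", 10), ("btc_high_vol72", 11), ("btc_low_vol72", 11), ("btc_high_volume", 12), ("btc_low_volume", 12), ("btc_rsi_hot", 13), ("btc_rsi_cold", 13), ("btc_rsi_mid", 13), ("btc_mom24_up", 14), ("btc_mom24_down", 14), ("btc_mom72_up", 15), ("btc_mom72_down", 15), ("btc_trend72_up", 16), ("btc_trend72_down", 16), ("btc_trend288_up", 17), ("btc_trend288_down", 17), ("btc_p_ge_0p6", 18), ("btc_p_le_0p4", 18), ("btc_p_ge_0p8", 19), ("btc_p_le_0p2", 19), ("btc_forecast_up", 20), ("btc_forecast_down", 20), ("btc_sol_agree", 21), ("btc_sol_disagree", 21), ("hour_0_7", 22), ("hour_8_15", 22), ("hour_16_23", 22), ("weekday", 23), ("weekend", 23)]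

def incompatible_pair_alt (left : String) (right : String) : Bool :=
  match pvGroupOf.get? left with
  | none => false
  | some g => pvGroupOf.get? right == some g

-- ===== PRECONDITION & SPEC =====
def Spec_incompatible_pair (left : String) (right : String) (out : Bool) : Prop := out = incompatible_pair_alt left right
instance (left : String) (right : String) (out : Bool) : Decidable (Spec_incompatible_pair left right out) := by unfold Spec_incompatible_pair; infer_instance

-- ===== CLAIM (what is proved, stated in full; the proofs are below) =====
def Claim_equal_incompatible_pair : Prop := ∀ (left : String) (right : String), Dom_incompatible_pair left right → Spec_incompatible_pair left right (incompatible_pair left right)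

-- ===== LEMMAS AND PROOFS =====
-- each group (paired with its position) contains exactly the labels the table maps to that position
set_option maxRecDepth 10000 in
theorem pvF : ∀ gi ∈ pvGroups_A.zipIdx, ∀ p ∈ pvGroupOf.items,
    PySem.Set.contains gi.1 p.1 = (p.2 == (gi.2 : Int)) := by decide

-- every table value is a group position (0 ≤ v < 24 = number of groups)
theorem pvVB : ∀ p ∈ pvGroupOf.items, 0 ≤ p.2 ∧ p.2 < 24 := by decide

theorem pvLEN : pvGroups_A.length = 24 := by decide

theorem pvC (p : String × Int) (hp : p ∈ pvGroupOf.items) :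
    ∃ gi ∈ pvGroups_A.zipIdx, (gi.2 : Int) = p.2 := by
  obtain ⟨h0, h24⟩ := pvVB p hp
  have hlt : p.2.toNat < pvGroups_A.length := by rw [pvLEN]; omega
  refine ⟨(pvGroups_A[p.2.toNat], p.2.toNat), ?_, by omega⟩
  exact List.mk_mem_zipIdx_iff_getElem?.mpr (by simp [List.getElem?_eq_getElem hlt])

-- the table's keys are exactly the group members, in order
theorem pvKEYS : pvGroupOf.keys = pvGroups_A.flatten := by decide

theorem pvKM (g : PySem.Set String) (hg : g ∈ pvGroups_A) (x : String) (hx : x ∈ g) :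
    x ∈ pvGroupOf.keys := by
  rw [pvKEYS]
  exact List.mem_flatten.mpr ⟨g, hg, hx⟩

theorem pv_main_eq (l r : String) : incompatible_pair l r = incompatible_pair_alt l r := by
  unfold incompatible_pair incompatible_pair_alt
  cases hl : pvGroupOf.get? l with
  | none =>
    have hlk : l ∉ pvGroupOf.keys := (PySem.Dict.get?_eq_none_iff_not_mem_keys pvGroupOf l).mp hl
    refine List.any_eq_false.mpr ?_
    intro g hg
    cases hcl : PySem.Set.contains g l with
    | false => simp
    | true => exact absurd (pvKM g hg l ((PySem.Set.contains_iff g l).mp hcl)) hlk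
  | some v =>
    have hpl : (l, v) ∈ pvGroupOf.items := PySem.Dict.mem_items_of_get?_eq_some _ hl
    cases hr : pvGroupOf.get? r with
    | none =>
      have hrk : r ∉ pvGroupOf.keys := (PySem.Dict.get?_eq_none_iff_not_mem_keys pvGroupOf r).mp hr
      have : pvGroups_A.any (fun g => PySem.Set.contains g l && PySem.Set.contains g r) = false := by
        refine List.any_eq_false.mpr ?_
        intro g hg
        cases hcr : PySem.Set.contains g r with
        | false => simp
        | true => exact absurd (pvKM g hg r ((PySem.Set.contains_iff g r).mp hcr)) hrk
      rw [this]
      simp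
    | some w =>
      have hpr : (r, w) ∈ pvGroupOf.items := PySem.Dict.mem_items_of_get?_eq_some _ hr
      by_cases hvw : v = w
      · subst hvw
        obtain ⟨gi, hgi, hv⟩ := pvC (l, v) hpl
        have h1 : PySem.Set.contains gi.1 l = true := by
          have := pvF gi hgi (l, v) hpl
          simp only at this
          rw [this, hv]
          simp
        have h2 : PySem.Set.contains gi.1 r = true := by
          have := pvF gi hgi (r, v) hpr
          simp only at this
          rw [this, hv]
          simp
        have : pvGroups_A.any (fun g => PySem.Set.contains g l && PySem.Set.contains g r) = true :=
          List.any_eq_true.mpr ⟨gi.1, List.fst_mem_of_mem_zipIdx hgi, by rw [h1, h2]; rfl⟩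
        rw [this]
        show true = (some v == some v)
        exact (beq_self_eq_true (some v)).symm
      · have hA : pvGroups_A.any (fun g => PySem.Set.contains g l && PySem.Set.contains g r) = false := by
          refine List.any_eq_false.mpr ?_
          intro g hg
          obtain ⟨i, hi, rfl⟩ := List.mem_iff_getElem.mp hg
          have hmem : (pvGroups_A[i], i) ∈ pvGroups_A.zipIdx :=
            List.mk_mem_zipIdx_iff_getElem?.mpr (by simp [List.getElem?_eq_getElem hi])
          have e1 := pvF (pvGroups_A[i], i) hmem (l, v) hpl
          have e2 := pvF (pvGroups_A[i], i) hmem (r, w) hpr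
          simp only at e1 e2
          rw [e1, e2]
          by_cases h : v = (i : Int)
          · have hw : (w == (i : Int)) = false :=
              beq_eq_false_iff_ne.mpr (fun hw => hvw (h.trans hw.symm))
            rw [hw, Bool.and_false]
            exact Bool.false_ne_true
          · rw [beq_eq_false_iff_ne.mpr h, Bool.false_and]
            exact Bool.false_ne_true
        rw [hA]
        show false = (some w == some v)
        have hwv : (w == v) = false := beq_eq_false_iff_ne.mpr (fun h => hvw h.symm)
        have hob : ((some w == some v) : Bool) = (w == v) := rfl
        rw [hob, hwv]

-- ===== VERDICT (by name: the statement is the Claim_ definition above) =====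
theorem incompatible_pair_spec : Claim_equal_incompatible_pair := by
  intro l r _
  unfold Spec_incompatible_pair
  exact pv_main_eq l r
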